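-- pv_equiv track=rewrite | github.com/paulgarces/Youtube-NLP-Analysis | youtube_watch_analysis.py | classify_title
-- ===== SOURCE A (Python) =====
-- def classify_title(title, categories):
--     title_lower = title.lower()
--
--     # Check for direct keyword matches
--     scores = {}
--     for category, keywords in categories.items():
--         score = sum(1 for keyword in keywords if keyword.lower() in title_lower)
--         scores[category] = score
--
--     # If we have a clear match, return it
--     max_score = max(scores.values())
--     if max_score > 0:
--         best_categories = [cat for cat, score in scores.items() if score == max_score]
--         return best_categories[0]
--
--     # If no direct match, return "Other"
--     return "Other"
-- ===== SOURCE B (Python) =====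
-- def classify_title(title, categories):
--     title_lower = title.lower()
--     best_cat = None
--     best_score = 0
--     for category, keywords in categories.items():
--         score = sum(1 for kw in keywords if kw.lower() in title_lower)
--         if score > best_score:
--             best_cat, best_score = category, score
--     return best_cat if best_cat is not None else "Other"
-- ===== Notes on version B (the rewrite author's own statement) =====
-- stated objective: simpler
-- what changed: Replaces the scores-dict construction followed by max() and a filter-for-ties pass with one running-best pass (strict '>' keeps the first category reaching the maximum, matching A's dict-order tie-break).
-- crash fix: On an empty categories dict A raises ValueError (max() of an empty sequence) while B returns 'Other'. — e.g. on classify_title("abc", []): A raises ValueError, B returns "Other"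
import Mathlib
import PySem

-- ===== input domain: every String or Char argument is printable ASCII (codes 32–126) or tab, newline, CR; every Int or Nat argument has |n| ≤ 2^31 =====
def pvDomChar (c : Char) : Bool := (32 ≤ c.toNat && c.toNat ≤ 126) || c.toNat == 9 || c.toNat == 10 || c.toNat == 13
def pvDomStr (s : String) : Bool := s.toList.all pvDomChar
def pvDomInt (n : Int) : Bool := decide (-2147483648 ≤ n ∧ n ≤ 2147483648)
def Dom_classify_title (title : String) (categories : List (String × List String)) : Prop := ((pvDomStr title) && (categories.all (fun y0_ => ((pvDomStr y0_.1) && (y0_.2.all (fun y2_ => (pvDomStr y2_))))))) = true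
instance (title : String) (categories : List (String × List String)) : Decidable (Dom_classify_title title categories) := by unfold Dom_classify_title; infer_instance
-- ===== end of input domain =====

-- B replaces A's scores-dict + max() + filter-for-ties sequence by a single running-best pass; equal on all non-empty dicts.

-- shared helper: score = sum(1 for keyword in keywords if keyword.lower() in title_lower)  (identical expression in A and B)
def pvScore (title_lower : String) (keywords : List String) : Int :=
  keywords.foldl (fun s kw => if PySem.Str.isIn (PySem.Str.lower kw) title_lower then s + 1 else s) 0

-- ===== PORT A =====
def classify_title (title : String) (categories : List (String × List String)) : String :=
  let title_lower := PySem.Str.lower title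
  let scores : PySem.Dict String Int :=
    categories.foldl (fun d p => d.insert p.1 (pvScore title_lower p.2)) PySem.Dict.empty
  match PySem.List.max? scores.values (fun y => y) with
  | none => ""  -- max() of an empty sequence raises ValueError; excluded by Pre_
  | some max_score =>
    if max_score > 0 then
      match PySem.List.pyGet? ((scores.items.filter (fun p => p.2 == max_score)).map (fun p => p.1)) 0 with
      | some c => c
      | none => ""  -- unreachable: the maximum is attained by some item
    else "Other"

-- ===== PORT B =====
def classify_title_alt (title : String) (categories : List (String × List String)) : String :=
  let title_lower := PySem.Str.lower title
  let best := categories.foldl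
    (fun (best : Option String × Int) p =>
      let score := pvScore title_lower p.2
      if best.2 < score then (some p.1, score) else best)
    (none, 0)
  match best.1 with
  | some c => c
  | none => "Other"

-- ===== PRECONDITION & SPEC =====
-- Pre_ excludes the empty dict, on which A's max() raises ValueError, and association lists with
-- duplicate keys, which do not represent any Python dict (the argument is a dict).
def Pre_classify_title (title : String) (categories : List (String × List String)) : Prop :=
  categories ≠ [] ∧ (categories.map Prod.fst).Nodup
instance (title : String) (categories : List (String × List String)) : Decidable (Pre_classify_title title categories) := by unfold Pre_classify_title; infer_instance

def pvWitness_classify_title : String × (List (String × List String)) :=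
  ("deep learning song demo", [("Tech", ["ai", "learning"]), ("Music", ["song"])])

-- On an empty categories dict A raises ValueError (max() of an empty sequence) while B returns "Other".
def Raises_classify_title (title : String) (categories : List (String × List String)) : Prop :=
  categories = []
instance (title : String) (categories : List (String × List String)) : Decidable (Raises_classify_title title categories) := by unfold Raises_classify_title; infer_instance
def pvRaiseWitness_classify_title : String × (List (String × List String)) := ("abc", [])
def pvRaiseWitnessOut_classify_title : String := "Other"

def Spec_classify_title (title : String) (categories : List (String × List String)) (out : String) : Prop := out = classify_title_alt title categories
instance (title : String) (categories : List (String × List String)) (out : String) : Decidable (Spec_classify_title title categories out) := by unfold Spec_classify_title; infer_instance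

-- ===== CLAIM (what is proved, stated in full; the proofs are below) =====
def Claim_equal_classify_title : Prop := ∀ (title : String) (categories : List (String × List String)), Dom_classify_title title categories → Pre_classify_title title categories → Spec_classify_title title categories (classify_title title categories)

def Claim_raises_classify_title : Prop := (∀ (title : String) (categories : List (String × List String)), Dom_classify_title title categories → Raises_classify_title title categories → ¬ Pre_classify_title title categories) ∧ (Dom_classify_title (pvRaiseWitness_classify_title.1) (pvRaiseWitness_classify_title.2) ∧ Raises_classify_title (pvRaiseWitness_classify_title.1) (pvRaiseWitness_classify_title.2) ∧ classify_title_alt (pvRaiseWitness_classify_title.1) (pvRaiseWitness_classify_title.2) = pvRaiseWitnessOut_classify_title)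

-- ===== LEMMAS AND PROOFS =====

lemma pvScore_nonneg (tl : String) (kws : List String) : 0 ≤ pvScore tl kws := by
  have h : ∀ (l : List String) (init : Int),
      init ≤ l.foldl (fun s kw => if PySem.Str.isIn (PySem.Str.lower kw) tl then s + 1 else s) init := by
    intro l
    induction l with
    | nil => intro init; simp
    | cons k t ih =>
      intro init
      simp only [List.foldl_cons]
      by_cases hP : PySem.Str.isIn (PySem.Str.lower k) tl
      · simp only [if_pos hP]
        have := ih (init + 1); omega
      · simp only [if_neg hP]
        exact ih init
  exact h kws 0

-- B's loop, over precomputed (category, score) pairs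
def pvLoop (ps : List (String × Int)) (acc : Option String × Int) : Option String × Int :=
  ps.foldl (fun a q => if a.2 < q.2 then (some q.1, q.2) else a) acc

lemma pvFoldl_max_mem : ∀ (l : List Int) (b : Int), l.foldl max b = b ∨ l.foldl max b ∈ l := by
  intro l
  induction l with
  | nil => intro b; left; rfl
  | cons x t ih =>
    intro b
    simp only [List.foldl_cons]
    rcases ih (max b x) with h | h
    · rcases max_choice b x with hm | hm
      · left; rw [h, hm]
      · right; rw [h, hm]; exact List.mem_cons_self
    · right; exact List.mem_cons_of_mem _ h

lemma pvLoop_fst : ∀ (ps : List (String × Int)) (c : Option String) (b : Int),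
    (pvLoop ps (c, b)).1 =
      if b < (ps.map Prod.snd).foldl max b
      then ((ps.filter (fun q => q.2 == (ps.map Prod.snd).foldl max b)).map Prod.fst).head?
      else c := by
  intro ps
  induction ps with
  | nil => intro c b; simp [pvLoop]
  | cons q t ih =>
    intro c b
    have hle : ∀ (x : Int), x ≤ (t.map Prod.snd).foldl max x :=
      fun x => (PySem.List.le_foldl_max (t.map Prod.snd) x).1
    simp only [pvLoop, List.foldl_cons, List.map_cons]
    by_cases h : b < q.2
    · rw [if_pos h]
      have hmax : max b q.2 = q.2 := by omega
      rw [hmax]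
      have hrec := ih (some q.1) q.2
      simp only [pvLoop] at hrec
      rw [hrec]
      have hbm : b < (t.map Prod.snd).foldl max q.2 := lt_of_lt_of_le h (hle q.2)
      rw [if_pos hbm]
      by_cases h2 : q.2 < (t.map Prod.snd).foldl max q.2
      · rw [if_pos h2]
        have hne : (q.2 == (t.map Prod.snd).foldl max q.2) = false := by
          simp only [beq_eq_false_iff_ne, ne_eq]; omega
        simp [hne]
      · rw [if_neg h2]
        have heq : (t.map Prod.snd).foldl max q.2 = q.2 := le_antisymm (by omega) (hle q.2)
        rw [heq]
        simp only [List.filter_cons, BEq.rfl]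
        simp
    · rw [if_neg h]
      have hmax : max b q.2 = b := by omega
      rw [hmax]
      have hrec := ih c b
      simp only [pvLoop] at hrec
      rw [hrec]
      by_cases h2 : b < (t.map Prod.snd).foldl max b
      · rw [if_pos h2, if_pos h2]
        have hne : (q.2 == (t.map Prod.snd).foldl max b) = false := by
          simp only [beq_eq_false_iff_ne, ne_eq]; omega
        simp [hne]
      · rw [if_neg h2, if_neg h2]

-- ===== VERDICT (by name: the statement is the Claim_ definition above) =====
theorem classify_title_spec : Claim_equal_classify_title := by
  intro title categories _ hpre
  obtain ⟨hne, hnd⟩ := hpre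
  obtain ⟨x, cs, rfl⟩ := List.exists_cons_of_ne_nil hne
  unfold Spec_classify_title classify_title classify_title_alt
  set tl := PySem.Str.lower title with htl
  set g : String × List String → String × Int := fun p => (p.1, pvScore tl p.2) with hg
  set ps : List (String × Int) := (x :: cs).map g with hps
  have hitems :
      ((x :: cs).foldl (fun d p => d.insert p.1 (pvScore tl p.2)) PySem.Dict.empty).items
        = ps := by
    have := PySem.Dict.items_foldl_insert_fresh (d := (PySem.Dict.empty : PySem.Dict String Int))
      (l := x :: cs) (k := Prod.fst) (v := fun p => pvScore tl p.2)
      (by intro a _; simp) hnd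
    simpa [hg, hps] using this
  have hmap : ps.map Prod.snd = pvScore tl x.2 :: cs.map (fun p => pvScore tl p.2) := by
    simp [hps, hg]
  set M : Int := (cs.map (fun p => pvScore tl p.2)).foldl max (pvScore tl x.2) with hM
  have hmax? : PySem.List.max? (ps.map Prod.snd) (fun y => y) = some M := by
    rw [hmap]; exact PySem.List.max?_id_cons _ _
  have hm0 : (ps.map Prod.snd).foldl max 0 = M := by
    rw [hmap]
    simp only [List.foldl_cons]
    rw [max_eq_right (pvScore_nonneg tl x.2)]
  have hB : (x :: cs).foldl
      (fun (best : Option String × Int) p =>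
        let score := pvScore tl p.2
        if best.2 < score then (some p.1, score) else best) (none, 0)
      = pvLoop ps (none, 0) := by
    simp [pvLoop, hps, hg, List.foldl_map]
  simp only [hB, PySem.Dict.values, hitems]
  have hvals : ps.map (fun p => p.2) = ps.map Prod.snd := rfl
  rw [hvals, hmax?, pvLoop_fst, hm0]
  dsimp only
  by_cases h : M > 0
  · rw [if_pos h, if_pos (lt_of_lt_of_le h le_rfl)]
    have hmem : M ∈ ps.map Prod.snd := by
      rcases pvFoldl_max_mem (ps.map Prod.snd) 0 with h0 | h0
      · rw [hm0] at h0; omega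
      · rw [hm0] at h0; exact h0
    obtain ⟨q, hq, hq2⟩ := List.mem_map.mp hmem
    have hfil : q ∈ ps.filter (fun q => q.2 == M) :=
      List.mem_filter.mpr ⟨hq, by simp [hq2]⟩
    have hfe : (ps.filter (fun q => q.2 == M)).map Prod.fst ≠ [] := by
      intro hc
      have : ps.filter (fun q => q.2 == M) = [] := List.map_eq_nil_iff.mp hc
      rw [this] at hfil; exact (List.not_mem_nil) hfil
    obtain ⟨c0, hc0⟩ : ∃ c0, ((ps.filter (fun q => q.2 == M)).map Prod.fst).head? = some c0 :=
      ⟨_, List.head?_eq_some_head hfe⟩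
    rw [PySem.List.pyGet?_zero, ← List.head?_eq_getElem?, hc0]
  · rw [if_neg h, if_neg (by omega : ¬ (0:Int) < M)]

@[simp] theorem classify_title_raises : Claim_raises_classify_title := by
  unfold Claim_raises_classify_title
  constructor
  · intro title categories _ hr hpre
    exact hpre.1 hr
  · exact ⟨by decide, by decide, by decide⟩
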